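-- pv_equiv track=rewrite | github.com/posl/comment_recommendation | script/split_gen/2_time/zh/251_B/8.py | get_good_num
-- ===== SOURCE A (Python) =====
-- def get_good_num(n,w,weights):
--     weights.sort()
--     good_nums = [False for i in range(w+1)]
--     good_nums[0] = True
--     for weight in weights:
--         for i in range(w,-1,-1):
--             if i - weight >= 0 and good_nums[i-weight]:
--                 good_nums[i] = True
--     return sum(good_nums)
-- ===== SOURCE B (Python) =====
-- def get_good_num(n, w, weights):
--     weights.sort()
--     reached = [False] * (w + 1)
--     reached[0] = True
--     count = 1
--     sums = [0]
--     for weight in weights: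
--         added = []
--         for s in sums:
--             t = s + weight
--             if t <= w and not reached[t]:
--                 reached[t] = True
--                 count += 1
--                 added.append(t)
--         sums.extend(added)
--     return count
-- ===== Notes on version B (the rewrite author's own statement) =====
-- stated objective: faster
-- what changed: Replaces A's per-weight backward scan of the entire index range [0,w] (plus a final full-array summation) by a sparse frontier expansion: B iterates only over the list of already-discovered reachable sums, marks each new sum once in a visited array, and keeps the count incrementally, so per-weight work is proportional to the sums discovered so far instead of w.
import Mathlib
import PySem

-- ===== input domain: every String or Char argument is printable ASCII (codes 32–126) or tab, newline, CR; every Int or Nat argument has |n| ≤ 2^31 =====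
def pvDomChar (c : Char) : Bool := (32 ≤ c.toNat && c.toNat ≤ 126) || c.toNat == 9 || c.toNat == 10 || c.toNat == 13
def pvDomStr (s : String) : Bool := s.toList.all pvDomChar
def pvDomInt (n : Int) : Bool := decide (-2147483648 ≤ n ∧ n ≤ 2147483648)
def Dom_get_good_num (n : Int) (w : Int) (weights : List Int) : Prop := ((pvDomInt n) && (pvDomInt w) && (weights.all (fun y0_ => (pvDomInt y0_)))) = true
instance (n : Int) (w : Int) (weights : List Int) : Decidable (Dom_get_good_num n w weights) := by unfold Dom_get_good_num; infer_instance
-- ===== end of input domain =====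

-- B replaces A's per-weight backward scan of the whole index range [0,w] (plus a final pass
-- summing the array) by a sparse frontier expansion: it iterates only over the sums already
-- discovered, marks each new sum once in a visited array, and keeps the count incrementally.
-- Same return value on Pre_; both sort `weights` in place (the equivalence proved is about
-- the return value; the mutation is identical).

-- ===== PORT A =====
-- inner loop `for i in range(w,-1,-1): if i - weight >= 0 and good_nums[i-weight]: good_nums[i] = True`
-- (the `none` branch is where Python would raise IndexError — unreachable under Pre_; the write
--  `good_nums[i] = True` is `g.set i.toNat true`: exact, since under Pre_ every i in
--  range(w,-1,-1) satisfies 0 ≤ i ≤ w < len(good_nums))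
def innerLoopA (w weight : Int) (good : List Bool) : List Bool :=
  (PySem.List.pyRange w (-1) (-1)).foldl (fun g i =>
    if i - weight ≥ 0 then
      match PySem.List.pyGet? g (i - weight) with
      | some b => if b then g.set i.toNat true else g
      | none => g
    else g) good

def get_good_num (n : Int) (w : Int) (weights : List Int) : Int :=
  let ws := PySem.List.sorted weights (fun x => x) false   -- weights.sort()
  -- good_nums = [False for i in range(w+1)]; good_nums[0] = True  (IndexError if w < 0: excluded by Pre_)
  let good0 : List Bool := ((PySem.List.pyRange 0 (w+1) 1).map (fun _ => false)).set 0 true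
  let goodF := ws.foldl (fun good weight => innerLoopA w weight good) good0
  goodF.foldl (fun acc b => acc + (if b then 1 else 0)) 0   -- sum(good_nums)

-- ===== PORT B =====
-- inner loop `for s in sums: t = s + weight; if t <= w and not reached[t]: reached[t] = True;
-- count += 1; added.append(t)` — `reached[t]` is PySem.List.pyGet? (the `none` branch is where
-- Python raises IndexError: unreachable under Pre_), the write is PySem.List.pySetD (exact,
-- Python's assignment semantics including a negative index)
def innerB (w weight : Int) (reached : List Bool) (count : Int) (sums : List Int) :
    List Bool × Int × List Int :=
  sums.foldl (fun st s =>
    if s + weight ≤ w then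
      match PySem.List.pyGet? st.1 (s + weight) with
      | some b => if b then st
          else (PySem.List.pySetD st.1 (s + weight) true, st.2.1 + 1, st.2.2 ++ [s + weight])
      | none => st
    else st) (reached, count, [])

def get_good_num_alt (n : Int) (w : Int) (weights : List Int) : Int :=
  let ws := PySem.List.sorted weights (fun x => x) false   -- weights.sort()
  -- reached = [False] * (w + 1)  (exactly max(w+1,0) copies, as Python's list repetition);
  -- reached[0] = True  (IndexError if w < 0: excluded by Pre_)
  let reached0 := PySem.List.pySetD (List.replicate (w + 1).toNat false) 0 true
  let final := ws.foldl (fun st weight =>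
      let r := innerB w weight st.1 st.2.1 st.2.2
      (r.1, r.2.1, st.2.2 ++ r.2.2))           -- sums.extend(added)
    (reached0, 1, [0])                          -- count = 1; sums = [0]
  final.2.1                                     -- return count

-- ===== PRECONDITION & SPEC =====
-- Pre_ is exactly where A returns: with w < 0 the assignment good_nums[0] = True raises
-- IndexError on the empty array, and with any negative weight the read good_nums[i-weight]
-- at i = w raises IndexError (index w - weight > w). A returns on every input in Pre_.
def Pre_get_good_num (n : Int) (w : Int) (weights : List Int) : Prop :=
  0 ≤ w ∧ ∀ x ∈ weights, 0 ≤ x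
instance (n : Int) (w : Int) (weights : List Int) : Decidable (Pre_get_good_num n w weights) := by unfold Pre_get_good_num; infer_instance

def pvWitness_get_good_num : Int × Int × List Int := (3, 6, [2, 3, 5])

def Spec_get_good_num (n : Int) (w : Int) (weights : List Int) (out : Int) : Prop := out = get_good_num_alt n w weights
instance (n : Int) (w : Int) (weights : List Int) (out : Int) : Decidable (Spec_get_good_num n w weights out) := by unfold Spec_get_good_num; infer_instance

-- ===== CLAIM (what is proved, stated in full; the proofs are below) =====
def Claim_equal_get_good_num : Prop := ∀ (n : Int) (w : Int) (weights : List Int), Dom_get_good_num n w weights → Pre_get_good_num n w weights → Spec_get_good_num n w weights (get_good_num n w weights)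

-- ===== LEMMAS AND PROOFS =====

def updA (good : List Bool) (weight : Int) (k : Nat) : Bool :=
  good.getD k false || (decide (weight ≤ (k : Int)) && good.getD (((k : Int) - weight).toNat) false)

theorem getD_set_true (l : List Bool) (i k : Nat) :
    (l.set i true).getD k false = if i = k ∧ k < l.length then true else l.getD k false := by
  simp only [List.getD_eq_getElem?_getD, List.getElem?_set]
  split_ifs with h1 h2 <;> simp_all

theorem step_one (weight : Int) (hw : 0 ≤ weight) (good g : List Bool) (m : Nat)
    (hlen : g.length = good.length) (hm : m < good.length)
    (hlow : ∀ k : Nat, k ≤ m → g.getD k false = good.getD k false) :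
    let g' := (if (m : Int) - weight ≥ 0 then
      match PySem.List.pyGet? g ((m : Int) - weight) with
      | some b => if b then g.set m true else g
      | none => g
    else g)
    g'.length = g.length ∧ (∀ k : Nat, k ≠ m → g'.getD k false = g.getD k false) ∧
      g'.getD m false = updA good weight m := by
  intro g'
  have hgm : g.getD m false = good.getD m false := hlow m le_rfl
  by_cases hc : weight ≤ (m : Int)
  · have h0 : (m : Int) - weight ≥ 0 := by omega
    have ht : ((m : Int) - weight) = ((((m : Int) - weight).toNat : Nat) : Int) := by omega
    have htm : ((m : Int) - weight).toNat ≤ m := by omega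
    have htl : ((m : Int) - weight).toNat < g.length := by omega
    have hread : g[((m : Int) - weight).toNat] = good.getD (((m : Int) - weight).toNat) false := by
      rw [← hlow _ htm, List.getD_eq_getElem _ _ htl]
    have hg' : g' = if good.getD (((m:Int) - weight).toNat) false then g.set m true else g := by
      show (if (m : Int) - weight ≥ 0 then _ else _) = _
      rw [if_pos h0, ht, PySem.List.pyGet?_natCast, List.getElem?_eq_getElem htl]
      simp only [← ht, hread]
    have hupd : updA good weight m = (good.getD m false || good.getD (((m:Int) - weight).toNat) false) := by
      unfold updA; simp [hc]
    by_cases hb : good.getD (((m:Int) - weight).toNat) false = true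
    · rw [hg', if_pos hb]
      refine ⟨List.length_set, ?_, ?_⟩
      · intro k hk
        rw [getD_set_true]
        have : ¬ (m = k ∧ k < g.length) := by intro ⟨h, _⟩; exact hk h.symm
        rw [if_neg this]
      · rw [getD_set_true, if_pos ⟨rfl, by omega⟩, hupd, hb, Bool.or_true]
    · rw [hg', if_neg hb]
      refine ⟨rfl, fun _ _ => rfl, ?_⟩
      rw [hupd, hgm]
      rw [Bool.not_eq_true] at hb
      rw [hb, Bool.or_false]
  · have h0 : ¬ ((m : Int) - weight ≥ 0) := by omega
    have hg' : g' = g := by show (if (m : Int) - weight ≥ 0 then _ else _) = _; rw [if_neg h0]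
    rw [hg']
    refine ⟨rfl, fun _ _ => rfl, ?_⟩
    unfold updA
    rw [hgm]
    simp [hc]

theorem innerLoopA_go (weight : Int) (hw : 0 ≤ weight) (good : List Bool) :
    ∀ (j : Nat) (g : List Bool), g.length = good.length → j < good.length →
    (∀ k : Nat, k ≤ j → g.getD k false = good.getD k false) →
    (∀ k : Nat, j < k → k < good.length → g.getD k false = updA good weight k) →
    ((PySem.List.pyRange (j : Int) (-1) (-1)).foldl (fun g i =>
      if i - weight ≥ 0 then
        match PySem.List.pyGet? g (i - weight) with
        | some b => if b then g.set i.toNat true else g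
        | none => g
      else g) g).length = good.length ∧
    ∀ k : Nat, k < good.length →
      ((PySem.List.pyRange (j : Int) (-1) (-1)).foldl (fun g i =>
      if i - weight ≥ 0 then
        match PySem.List.pyGet? g (i - weight) with
        | some b => if b then g.set i.toNat true else g
        | none => g
      else g) g).getD k false = updA good weight k := by
  intro j
  induction j with
  | zero =>
    intro g hlen hj hlow hhigh
    rw [PySem.List.pyRange_neg_one_cons (by omega), PySem.List.pyRange_neg_one_eq_nil (by omega)]
    simp only [List.foldl_cons, List.foldl_nil, Int.toNat_natCast]
    obtain ⟨h1, h2, h3⟩ := step_one weight hw good g 0 hlen hj hlow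
    refine ⟨by rw [h1, hlen], ?_⟩
    intro k hk
    rcases Nat.eq_zero_or_pos k with hk0 | hk0
    · subst hk0; exact h3
    · rw [h2 k (by omega), hhigh k (by omega) hk]
  | succ j ih =>
    intro g hlen hj hlow hhigh
    rw [PySem.List.pyRange_neg_one_cons (by omega)]
    simp only [List.foldl_cons, Int.toNat_natCast]
    obtain ⟨h1, h2, h3⟩ := step_one weight hw good g (j+1) hlen hj hlow
    have harg : (((j:Nat)+1 : Nat) : Int) - 1 = ((j : Nat) : Int) := by omega
    rw [harg]
    apply ih
    · rw [h1, hlen]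
    · omega
    · intro k hk
      rw [h2 k (by omega), hlow k (by omega)]
    · intro k hk hk2
      rcases Nat.lt_or_ge k (j+2) with hlt | hge
      · have : k = j + 1 := by omega
        subst this; exact h3
      · rw [h2 k (by omega), hhigh k (by omega) hk2]

theorem innerLoopA_spec (w weight : Int) (hw0 : 0 ≤ w) (hw : 0 ≤ weight) (good : List Bool)
    (hlen : good.length = (w + 1).toNat) :
    (innerLoopA w weight good).length = good.length ∧
    ∀ k : Nat, k < good.length → (innerLoopA w weight good).getD k false = updA good weight k := by
  have hwc : w = ((w.toNat : Nat) : Int) := by omega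
  have hj : w.toNat < good.length := by omega
  obtain ⟨h1, h2⟩ := innerLoopA_go weight hw good w.toNat good rfl hj
    (fun _ _ => rfl) (fun k hk hk2 => by omega)
  rw [innerLoopA, hwc]
  exact ⟨by rw [h1], h2⟩

theorem count_range_filter (l : List Bool) :
    ((List.range l.length).filter (fun k => l.getD k false)).length = l.countP (fun b => b) := by
  induction l with
  | nil => simp
  | cons b t ih =>
    rw [List.length_cons, List.range_succ_eq_map, List.filter_cons, List.filter_map]
    have hcomp : ((fun k => (b :: t).getD k false) ∘ Nat.succ) = (fun k => t.getD k false) := by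
      funext k; simp
    rw [hcomp]
    cases b <;> simp <;> simpa [List.getD_eq_getElem?_getD] using ih

theorem getD_map_false (l : List Int) (k : Nat) :
    ((l.map (fun _ => false)).getD k false) = false := by
  simp only [List.getD_eq_getElem?_getD, List.getElem?_map]
  cases l[k]? <;> simp

theorem countA_eq (good : List Bool) :
    good.foldl (fun acc b => acc + (if b then 1 else 0)) 0 = ((good.countP (fun b => b) : Nat) : Int) := by
  rw [PySem.List.foldl_add good (fun b => if b then 1 else 0) 0,
      PySem.List.sum_map_ite_one_zero (fun b => b), zero_add]

-- the invariant tying A's boolean array to B's (visited array, count, discovered-sums list)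
def InvR (w : Int) (good : List Bool) (r : List Int) : Prop :=
  r.Nodup ∧ good.length = (w + 1).toNat ∧ (∀ x ∈ r, 0 ≤ x ∧ x ≤ w) ∧
  (∀ k : Nat, k < good.length → (good.getD k false = true ↔ (k : Int) ∈ r))

-- mid-inner-loop invariant: the visited array differs from `good` exactly at the `added` sums
def QB (w weight : Int) (good : List Bool) (c : Int) (st : List Bool × Int × List Int) : Prop :=
  st.1.length = good.length ∧
  st.2.1 = c + (st.2.2.length : Int) ∧
  st.2.2.Nodup ∧
  (∀ x ∈ st.2.2, 0 ≤ x ∧ x ≤ w ∧ good.getD x.toNat false = false) ∧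
  (∀ k : Nat, k < good.length →
    (st.1.getD k false = true ↔ (good.getD k false = true ∨ (k : Int) ∈ st.2.2)))

theorem innerB_fold (w weight : Int) (hw0 : 0 ≤ w) (hwt : 0 ≤ weight) (good : List Bool) (c : Int)
    (hlen : good.length = (w + 1).toNat) :
    ∀ (l : List Int), (∀ s ∈ l, 0 ≤ s ∧ s ≤ w) → ∀ st, QB w weight good c st →
    QB w weight good c (l.foldl (fun st s =>
      if s + weight ≤ w then
        match PySem.List.pyGet? st.1 (s + weight) with
        | some b => if b then st
            else (PySem.List.pySetD st.1 (s + weight) true, st.2.1 + 1, st.2.2 ++ [s + weight])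
        | none => st
      else st) st) ∧
    (∀ k : Nat, k < good.length →
      ((l.foldl (fun st s =>
      if s + weight ≤ w then
        match PySem.List.pyGet? st.1 (s + weight) with
        | some b => if b then st
            else (PySem.List.pySetD st.1 (s + weight) true, st.2.1 + 1, st.2.2 ++ [s + weight])
        | none => st
      else st) st).1.getD k false = true ↔
        (st.1.getD k false = true ∨ ∃ s ∈ l, s + weight = (k : Int)))) := by
  intro l
  induction l with
  | nil =>
    intro _ st hq
    refine ⟨hq, ?_⟩
    intro k hk
    simp
  | cons s l ih =>
    intro hl st hq
    obtain ⟨hs0, hsw⟩ := hl s List.mem_cons_self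
    obtain ⟨hL, hC, hND, hBD, hM⟩ := hq
    simp only [List.foldl_cons]
    -- one step
    have hstep : QB w weight good c ((fun st s =>
        if s + weight ≤ w then
          match PySem.List.pyGet? st.1 (s + weight) with
          | some b => if b then st
              else (PySem.List.pySetD st.1 (s + weight) true, st.2.1 + 1, st.2.2 ++ [s + weight])
          | none => st
        else st) st s) ∧
        ∀ k : Nat, k < good.length →
          (((fun st s =>
        if s + weight ≤ w then
          match PySem.List.pyGet? st.1 (s + weight) with
          | some b => if b then st
              else (PySem.List.pySetD st.1 (s + weight) true, st.2.1 + 1, st.2.2 ++ [s + weight])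
          | none => st
        else st) st s).1.getD k false = true ↔
            (st.1.getD k false = true ∨ s + weight = (k : Int))) := by
      by_cases hc : s + weight ≤ w
      · have ht0 : (0 : Int) ≤ s + weight := by omega
        have htl : (s + weight).toNat < st.1.length := by omega
        have hcast : (((s + weight).toNat : Nat) : Int) = s + weight := by omega
        have hget : PySem.List.pyGet? st.1 (s + weight) =
            some (st.1.getD (s + weight).toNat false) := by
          conv_lhs => rw [← hcast]
          rw [PySem.List.pyGet?_natCast, List.getElem?_eq_getElem htl,
              List.getD_eq_getElem _ _ htl]
        by_cases hb : st.1.getD (s + weight).toNat false = true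
        · have hval : (fun st s =>
              if s + weight ≤ w then
                match PySem.List.pyGet? st.1 (s + weight) with
                | some b => if b then st
                    else (PySem.List.pySetD st.1 (s + weight) true, st.2.1 + 1, st.2.2 ++ [s + weight])
                | none => st
              else st) st s = st := by
            show (if s + weight ≤ w then _ else _) = _
            rw [if_pos hc, hget, hb]
            rfl
          rw [hval]
          refine ⟨⟨hL, hC, hND, hBD, hM⟩, ?_⟩
          intro k hk
          constructor
          · exact Or.inl
          · rintro (h | h)
            · exact h
            · have hkt : (s + weight).toNat = k := by omega
              rw [← hkt]; exact hb
        · have hval : (fun st s =>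
              if s + weight ≤ w then
                match PySem.List.pyGet? st.1 (s + weight) with
                | some b => if b then st
                    else (PySem.List.pySetD st.1 (s + weight) true, st.2.1 + 1, st.2.2 ++ [s + weight])
                | none => st
              else st) st s = (st.1.set (s + weight).toNat true, st.2.1 + 1,
                st.2.2 ++ [s + weight]) := by
            have hbf : st.1.getD (s + weight).toNat false = false := by
              rcases Bool.eq_false_or_eq_true (st.1.getD (s + weight).toNat false) with h | h
              · exact absurd h hb
              · exact h
            have hset : PySem.List.pySetD st.1 (s + weight) true
                = st.1.set (s + weight).toNat true := by
              conv_lhs => rw [← hcast]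
              rw [PySem.List.pySetD_natCast]
            show (if s + weight ≤ w then _ else _) = _
            rw [if_pos hc, hget, hbf, hset]
            rfl
          rw [hval]
          have hgoodt : good.getD (s + weight).toNat false = false := by
            have := hM (s + weight).toNat (by omega)
            rw [hcast] at this
            rcases Bool.eq_false_or_eq_true (good.getD (s + weight).toNat false) with h | h
            · exact absurd (this.mpr (Or.inl h)) hb
            · exact h
          have hnotadded : (s + weight) ∉ st.2.2 := by
            intro hmem
            have := hM (s + weight).toNat (by omega)
            rw [hcast] at this
            exact hb (this.mpr (Or.inr hmem))
          refine ⟨⟨?_, ?_, ?_, ?_, ?_⟩, ?_⟩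
          · rw [List.length_set]; exact hL
          · rw [List.length_append, List.length_singleton]; push_cast; omega
          · rw [List.nodup_append]
            refine ⟨hND, List.nodup_singleton _, ?_⟩
            intro x hx y hy
            rw [List.mem_singleton] at hy
            subst hy
            intro heq
            subst heq
            exact hnotadded hx
          · intro x hx
            rw [List.mem_append, List.mem_singleton] at hx
            rcases hx with hx | hx
            · exact hBD x hx
            · subst hx
              exact ⟨ht0, hc, hgoodt⟩
          · intro k hk
            rw [getD_set_true]
            by_cases hkt : (s + weight).toNat = k
            · rw [if_pos ⟨hkt, by omega⟩]
              subst hkt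
              simp only [true_iff]
              right
              rw [List.mem_append, List.mem_singleton]
              exact Or.inr hcast
            · rw [if_neg (by intro ⟨h, _⟩; exact hkt h)]
              rw [hM k hk]
              constructor
              · rintro (h | h)
                · exact Or.inl h
                · exact Or.inr (List.mem_append.mpr (Or.inl h))
              · rintro (h | h)
                · exact Or.inl h
                · rcases List.mem_append.mp h with h | h
                  · exact Or.inr h
                  · rw [List.mem_singleton] at h
                    exact absurd (by omega : (s + weight).toNat = k) hkt
          · intro k hk
            rw [getD_set_true]
            by_cases hkt : (s + weight).toNat = k
            · rw [if_pos ⟨hkt, by omega⟩]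
              simp only [true_iff]
              right; omega
            · rw [if_neg (by intro ⟨h, _⟩; exact hkt h)]
              constructor
              · exact Or.inl
              · rintro (h | h)
                · exact h
                · exact absurd (by omega : (s + weight).toNat = k) hkt
      · have hval : (fun st s =>
            if s + weight ≤ w then
              match PySem.List.pyGet? st.1 (s + weight) with
              | some b => if b then st
                  else (PySem.List.pySetD st.1 (s + weight) true, st.2.1 + 1, st.2.2 ++ [s + weight])
              | none => st
            else st) st s = st := by
          simp only [if_neg hc]
        rw [hval]
        refine ⟨⟨hL, hC, hND, hBD, hM⟩, ?_⟩
        intro k hk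
        constructor
        · exact Or.inl
        · rintro (h | h)
          · exact h
          · exact absurd h (by omega)
    obtain ⟨hq', hchar1⟩ := hstep
    obtain ⟨hqf, hcharf⟩ := ih (fun x hx => hl x (List.mem_cons_of_mem s hx)) _ hq'
    refine ⟨hqf, ?_⟩
    intro k hk
    rw [hcharf k hk, hchar1 k hk]
    have hsplit : (∃ s' ∈ s :: l, s' + weight = (k : Int)) ↔
        (s + weight = (k : Int) ∨ ∃ s' ∈ l, s' + weight = (k : Int)) := by
      constructor
      · rintro ⟨x, hx, he⟩
        rcases List.mem_cons.mp hx with rfl | hx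
        · exact Or.inl he
        · exact Or.inr ⟨x, hx, he⟩
      · rintro (he | ⟨x, hx, he⟩)
        · exact ⟨s, List.mem_cons_self, he⟩
        · exact ⟨x, List.mem_cons_of_mem s hx, he⟩
    rw [hsplit]
    tauto

theorem updA_true_iff (w weight : Int) (hwt : 0 ≤ weight) (good : List Bool) (sums : List Int)
    (hlen : good.length = (w + 1).toNat)
    (hbnd : ∀ x ∈ sums, 0 ≤ x ∧ x ≤ w)
    (hmem : ∀ k : Nat, k < good.length → (good.getD k false = true ↔ (k : Int) ∈ sums))
    (k : Nat) (hk : k < good.length) :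
    (updA good weight k = true) ↔
      (good.getD k false = true ∨ ∃ s ∈ sums, s + weight = (k : Int)) := by
  unfold updA
  simp only [Bool.or_eq_true, Bool.and_eq_true, decide_eq_true_eq]
  constructor
  · rintro (h | ⟨hwk, hg⟩)
    · exact Or.inl h
    · right
      have hcast : ((((k : Int) - weight).toNat : Nat) : Int) = (k : Int) - weight := by omega
      have hlt : ((k : Int) - weight).toNat < good.length := by omega
      refine ⟨(k : Int) - weight, ?_, by omega⟩
      rw [← hcast]
      exact (hmem _ hlt).mp hg
  · rintro (h | ⟨s, hs, hsk⟩)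
    · exact Or.inl h
    · obtain ⟨hs0, hsw⟩ := hbnd s hs
      right
      refine ⟨by omega, ?_⟩
      have hscast : ((s.toNat : Nat) : Int) = s := by omega
      have hslt : s.toNat < good.length := by omega
      have harg : ((k : Int) - weight).toNat = s.toNat := by omega
      rw [harg]
      exact (hmem s.toNat hslt).mpr (by rw [hscast]; exact hs)

theorem stepB (w weight : Int) (hw0 : 0 ≤ w) (hwt : 0 ≤ weight) (good : List Bool) (c : Int)
    (sums : List Int) (hcnt : c = (sums.length : Int)) (h : InvR w good sums) :
    (innerB w weight good c sums).1 = innerLoopA w weight good ∧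
    (innerB w weight good c sums).2.1 =
      ((sums ++ (innerB w weight good c sums).2.2).length : Int) ∧
    InvR w (innerLoopA w weight good) (sums ++ (innerB w weight good c sums).2.2) := by
  unfold innerB
  obtain ⟨hnd, hlen, hbnd, hmem⟩ := h
  have hq0 : QB w weight good c (good, c, ([] : List Int)) := by
    refine ⟨rfl, by simp, List.nodup_nil, by simp, ?_⟩
    intro k hk
    simp
  obtain ⟨⟨hL, hC, hND, hBD, hM⟩, hchar⟩ :=
    innerB_fold w weight hw0 hwt good c hlen sums hbnd _ hq0
  obtain ⟨hAlen, hAget⟩ := innerLoopA_spec w weight hw0 hwt good hlen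
  have hRgetD : ∀ k : Nat, k < good.length →
      (sums.foldl (fun st s =>
        if s + weight ≤ w then
          match PySem.List.pyGet? st.1 (s + weight) with
          | some b => if b then st
              else (PySem.List.pySetD st.1 (s + weight) true, st.2.1 + 1, st.2.2 ++ [s + weight])
          | none => st
        else st) (good, c, [])).1.getD k false = updA good weight k := by
    intro k hk
    rw [Bool.eq_iff_iff, hchar k hk, updA_true_iff w weight hwt good sums hlen hbnd hmem k hk]
  have hEq : (sums.foldl (fun st s =>
        if s + weight ≤ w then
          match PySem.List.pyGet? st.1 (s + weight) with
          | some b => if b then st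
              else (PySem.List.pySetD st.1 (s + weight) true, st.2.1 + 1, st.2.2 ++ [s + weight])
          | none => st
        else st) (good, c, [])).1 = innerLoopA w weight good := by
    apply List.ext_getElem (by rw [hL, hAlen])
    intro i h1 h2
    have hi : i < good.length := by rw [hAlen] at h2; exact h2
    have e1 := hRgetD i hi
    have e2 := hAget i hi
    rw [List.getD_eq_getElem _ _ h1] at e1
    rw [List.getD_eq_getElem _ _ h2] at e2
    rw [e1, e2]
  refine ⟨hEq, ?_, ?_, by rw [hAlen]; exact hlen, ?_, ?_⟩
  · rw [List.length_append]; push_cast; omega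
  · rw [List.nodup_append]
    refine ⟨hnd, hND, ?_⟩
    intro x hx y hy
    intro heq
    subst heq
    obtain ⟨hx0, hxw⟩ := hbnd x hx
    obtain ⟨-, -, hfalse⟩ := hBD x hy
    have hxcast : ((x.toNat : Nat) : Int) = x := by omega
    have hxlt : x.toNat < good.length := by omega
    have htrue := (hmem x.toNat hxlt).mpr (by rw [hxcast]; exact hx)
    rw [htrue] at hfalse
    exact absurd hfalse (by simp)
  · intro x hx
    rcases List.mem_append.mp hx with hx | hx
    · exact hbnd x hx
    · obtain ⟨h1, h2, -⟩ := hBD x hx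
      exact ⟨h1, h2⟩
  · intro k hk
    rw [hAlen] at hk
    have e := hAget k hk
    have hu := updA_true_iff w weight hwt good sums hlen hbnd hmem k hk
    have hMk := hM k hk
    have hcharK := hchar k hk
    constructor
    · intro h
      rw [e] at h
      rcases hu.mp h with h1 | h1
      · exact List.mem_append.mpr (Or.inl ((hmem k hk).mp h1))
      · rcases hMk.mp (hcharK.mpr (Or.inr h1)) with h2 | h2
        · exact List.mem_append.mpr (Or.inl ((hmem k hk).mp h2))
        · exact List.mem_append.mpr (Or.inr h2)
    · intro h
      rw [e]
      rcases List.mem_append.mp h with h1 | h1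
      · exact hu.mpr (Or.inl ((hmem k hk).mpr h1))
      · exact hu.mpr (hcharK.mp (hMk.mpr (Or.inr h1)))

def InvB (w : Int) (good : List Bool) (st : List Bool × Int × List Int) : Prop :=
  st.1 = good ∧ st.2.1 = (st.2.2.length : Int) ∧ InvR w good st.2.2

theorem fold_invB (w : Int) (hw0 : 0 ≤ w) :
    ∀ (l : List Int), (∀ x ∈ l, 0 ≤ x) → ∀ (good : List Bool) (st : List Bool × Int × List Int),
    InvB w good st →
    InvB w (l.foldl (fun good weight => innerLoopA w weight good) good)
      (l.foldl (fun st weight =>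
        let r := innerB w weight st.1 st.2.1 st.2.2
        (r.1, r.2.1, st.2.2 ++ r.2.2)) st) := by
  intro l
  induction l with
  | nil => exact fun _ _ _ h => h
  | cons a t ih =>
    intro hnn good st h
    obtain ⟨h1, h2, h3⟩ := h
    simp only [List.foldl_cons]
    have ha0 : 0 ≤ a := hnn a List.mem_cons_self
    have hs := stepB w a hw0 ha0 good st.2.1 st.2.2 (by rw [h2]) h3
    obtain ⟨e1, e2, e3⟩ := hs
    exact ih (fun x hx => hnn x (List.mem_cons_of_mem a hx)) _ _
      (by show InvB w (innerLoopA w a good) ((innerB w a st.1 st.2.1 st.2.2).1,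
            (innerB w a st.1 st.2.1 st.2.2).2.1,
            st.2.2 ++ (innerB w a st.1 st.2.1 st.2.2).2.2)
          rw [h1]
          exact ⟨e1, e2, e3⟩)

theorem length_sums_eq (w : Int) (good : List Bool) (r : List Int) (h : InvR w good r) :
    ((r.length : Nat) : Int) = ((good.countP (fun b => b) : Nat) : Int) := by
  obtain ⟨hnd, hlen, hbnd, hmem⟩ := h
  have hLnd : (((List.range good.length).filter (fun k => good.getD k false)).map
      Int.ofNat).Nodup :=
    ((List.nodup_range).filter _).map (fun a b hab => Int.ofNat.inj hab)
  have hperm : r.Perm (((List.range good.length).filter (fun k => good.getD k false)).map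
      Int.ofNat) := by
    rw [List.perm_ext_iff_of_nodup hnd hLnd]
    intro x
    rw [List.mem_map]
    constructor
    · intro hx
      obtain ⟨hx0, hxw⟩ := hbnd x hx
      have hcast : ((x.toNat : Nat) : Int) = x := by omega
      have hlt : x.toNat < good.length := by omega
      refine ⟨x.toNat, List.mem_filter.mpr ⟨List.mem_range.mpr hlt, ?_⟩, hcast⟩
      simpa using (hmem x.toNat hlt).mpr (by rw [hcast]; exact hx)
    · rintro ⟨k, hkf, rfl⟩
      rw [List.mem_filter, List.mem_range] at hkf
      exact (hmem k hkf.1).mp (by simpa using hkf.2)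
  have hcount : r.length = good.countP (fun b => b) := by
    rw [hperm.length_eq, List.length_map, count_range_filter]
  rw [hcount]

theorem init_arrays_eq (w : Int) (hw0 : 0 ≤ w) :
    PySem.List.pySetD (List.replicate (w + 1).toNat false) 0 true
      = ((PySem.List.pyRange 0 (w + 1) 1).map (fun _ => false)).set 0 true := by
  have h1 : (PySem.List.pyRange 0 (w + 1) 1).map (fun _ => false)
      = List.replicate (w + 1).toNat false := by
    rw [List.map_const', PySem.List.length_pyRange_one]
    congr 1
    omega
  rw [h1, PySem.List.pySetD_of_nonneg _ _ le_rfl]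
  rfl

theorem invR_init (w : Int) (hw0 : 0 ≤ w) :
    InvR w (((PySem.List.pyRange 0 (w + 1) 1).map (fun _ => false)).set 0 true) [(0 : Int)] := by
  have hlenbase : ((PySem.List.pyRange 0 (w + 1) 1).map (fun _ => false)).length = (w + 1).toNat := by
    rw [List.length_map, PySem.List.length_pyRange_one]; omega
  refine ⟨List.nodup_singleton 0, by rw [List.length_set, hlenbase], ?_, ?_⟩
  · intro x hx
    rw [List.mem_singleton] at hx
    subst hx
    omega
  · intro k hk
    rw [List.length_set, hlenbase] at hk
    rcases k with _ | k
    · rw [getD_set_true, if_pos ⟨rfl, by rw [hlenbase]; omega⟩]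
      simp
    · rw [getD_set_true, if_neg (by intro ⟨hh, _⟩; omega), getD_map_false]
      simp
      omega

-- ===== VERDICT (by name: the statement is the Claim_ definition above) =====
theorem get_good_num_spec : Claim_equal_get_good_num := by
  intro n w weights _ hpre
  obtain ⟨hw0, hwts⟩ := hpre
  show get_good_num n w weights = get_good_num_alt n w weights
  simp only [get_good_num, get_good_num_alt]
  have hmemws : ∀ x ∈ PySem.List.sorted weights (fun x => x) false, 0 ≤ x :=
    fun x hx => hwts x ((PySem.List.sorted_perm weights (fun x => x) false).mem_iff.mp hx)
  have hinit : InvB w (((PySem.List.pyRange 0 (w + 1) 1).map (fun _ => false)).set 0 true)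
      (PySem.List.pySetD (List.replicate (w + 1).toNat false) 0 true, 1, [(0 : Int)]) :=
    ⟨init_arrays_eq w hw0, by simp, invR_init w hw0⟩
  have hinv := fold_invB w hw0 _ hmemws _ _ hinit
  obtain ⟨-, hcnt, hinvR⟩ := hinv
  rw [countA_eq, hcnt, length_sums_eq w _ _ hinvR]
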